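-- pv_equiv track=rewrite | github.com/1610-Fappy/COMP3311-POKEMONDB | helpers.py | split_tup_vals
-- ===== SOURCE A (Python) =====
-- def split_tup_vals(tup_list : list):
--     if (len(tup_list) == 0):
--         return tup_list
--     evonum_list = []
--     name_list = []
--     req_list = []
--
--     for t in tup_list:
--         evonum_list.append(t[0])
--         name_list.append(t[2])
--         req_list.append(t[3])
--
--     return evonum_list, name_list, req_list
-- ===== SOURCE B (Python) =====
-- def split_tup_vals(tup_list : list):
--     if (len(tup_list) == 0):
--         return tup_list
--     cols = list(zip(*tup_list))
--     return list(cols[0]), list(cols[2]), list(cols[3])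
-- ===== Notes on version B (the rewrite author's own statement) =====
-- stated objective: idiomatic
-- what changed: Replaces the row-by-row loop appending to three accumulator lists with a single column-wise zip(*...) transpose followed by selecting columns 0, 2 and 3.
-- outside the precondition, e.g. on split_tup_vals([]): A returns (), B returns ()
import Mathlib
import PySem

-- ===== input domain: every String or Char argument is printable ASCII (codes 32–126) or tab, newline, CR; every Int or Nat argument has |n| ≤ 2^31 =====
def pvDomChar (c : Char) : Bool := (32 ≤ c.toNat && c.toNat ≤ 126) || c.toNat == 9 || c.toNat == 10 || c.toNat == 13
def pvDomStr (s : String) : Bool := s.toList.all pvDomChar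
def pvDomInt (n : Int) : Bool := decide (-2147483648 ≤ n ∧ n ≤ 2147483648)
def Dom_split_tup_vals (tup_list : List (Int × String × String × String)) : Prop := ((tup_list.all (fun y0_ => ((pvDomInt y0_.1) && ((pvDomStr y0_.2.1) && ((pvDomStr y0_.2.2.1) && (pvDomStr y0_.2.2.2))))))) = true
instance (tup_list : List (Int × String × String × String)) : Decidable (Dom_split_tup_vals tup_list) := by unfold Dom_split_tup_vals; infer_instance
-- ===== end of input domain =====

-- B replaces A's row-by-row triple-append loop with a zip(*...) transpose selecting columns 0, 2, 3 (idiomatic).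


-- ===== PORT A =====
-- A's loop: append t[0], t[2], t[3] of each row to three accumulator lists.
-- On the empty list Python A returns the input list itself (not a 3-tuple) — excluded by Pre_;
-- the guard here falls through to the loop, which yields ([],[],[]) there.
def split_tup_vals (tup_list : List (Int × String × String × String)) : List Int × List String × List String :=
  tup_list.foldl
    (fun acc t => (acc.1 ++ [t.1], acc.2.1 ++ [t.2.2.1], acc.2.2 ++ [t.2.2.2]))
    ([], [], [])

-- ===== PORT B =====
-- B: cols = zip(*tup_list) (the four column lists), then pick columns 0, 2, 3.
def split_tup_vals_alt (tup_list : List (Int × String × String × String)) : List Int × List String × List String :=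
  let cols := (tup_list.map (·.1), tup_list.map (·.2.1), tup_list.map (·.2.2.1), tup_list.map (·.2.2.2))
  (cols.1, cols.2.2.1, cols.2.2.2)

-- ===== PRECONDITION & SPEC =====
-- Pre_ excludes the empty list, on which Python A (and B) return the input list itself,
-- a value that is not of the declared triple-of-lists return type.
def Pre_split_tup_vals (tup_list : List (Int × String × String × String)) : Prop := tup_list ≠ []
instance (tup_list : List (Int × String × String × String)) : Decidable (Pre_split_tup_vals tup_list) := by unfold Pre_split_tup_vals; infer_instance
def pvWitness_split_tup_vals : (List (Int × String × String × String)) := [(1, "a", "b", "c")]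

def Spec_split_tup_vals (tup_list : List (Int × String × String × String)) (out : List Int × List String × List String) : Prop := out = split_tup_vals_alt tup_list
instance (tup_list : List (Int × String × String × String)) (out : List Int × List String × List String) : Decidable (Spec_split_tup_vals tup_list out) := by unfold Spec_split_tup_vals; infer_instance

-- ===== CLAIM (what is proved, stated in full; the proofs are below) =====
def Claim_equal_split_tup_vals : Prop := ∀ (tup_list : List (Int × String × String × String)), Dom_split_tup_vals tup_list → Pre_split_tup_vals tup_list → Spec_split_tup_vals tup_list (split_tup_vals tup_list)

-- ===== LEMMAS AND PROOFS =====
theorem split_loop_eq (tup_list : List (Int × String × String × String))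
    (e : List Int) (n r : List String) :
    tup_list.foldl
      (fun acc t => (acc.1 ++ [t.1], acc.2.1 ++ [t.2.2.1], acc.2.2 ++ [t.2.2.2]))
      (e, n, r)
    = (e ++ tup_list.map (·.1), n ++ tup_list.map (·.2.2.1), r ++ tup_list.map (·.2.2.2)) := by
  induction tup_list generalizing e n r with
  | nil => simp
  | cons t ts ih => simp [List.foldl, ih]

-- ===== VERDICT (by name: the statement is the Claim_ definition above) =====
theorem split_tup_vals_spec : Claim_equal_split_tup_vals := by
  intro tup_list _ _
  show _ = _
  simp [split_tup_vals, split_tup_vals_alt, split_loop_eq]
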